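-- pv_equiv track=rewrite | github.com/rohan83033/Leetcode | 039.Next_greater_numerically_balanced.py | solve
-- ===== SOURCE A (Python) =====
-- def solve(x: int) -> bool:
--     s = str(x)
--     vec = [0]*10
--     for ch in s:
--         vec[ord(ch)-48] += 1
--     for ch in s:
--         c = ord(ch)-48
--         if c == 0 or vec[c] != c:
--             return False
--     return True
-- ===== SOURCE B (Python) =====
-- def _check(s):
--     # s: sorted list of characters; each maximal run of a digit d must have length d
--     if not s:
--         return True
--     ch = s[0]
--     k = 1
--     while k < len(s) and s[k] == ch:
--         k += 1
--     if ord(ch) - 48 != k: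
--         return False
--     return _check(s[k:])
--
--
-- def solve(x: int) -> bool:
--     return _check(sorted(str(x)))
-- ===== Notes on version B (the rewrite author's own statement) =====
-- stated objective: alternative
-- what changed: B sorts the characters of str(x) and checks each contiguous run's length against its digit value by run recursion, instead of A's fixed-size count array built in one pass and re-scanned in a second; using the character code offset (not int()) keeps a minus sign failing the check exactly as in A.
import Mathlib
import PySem

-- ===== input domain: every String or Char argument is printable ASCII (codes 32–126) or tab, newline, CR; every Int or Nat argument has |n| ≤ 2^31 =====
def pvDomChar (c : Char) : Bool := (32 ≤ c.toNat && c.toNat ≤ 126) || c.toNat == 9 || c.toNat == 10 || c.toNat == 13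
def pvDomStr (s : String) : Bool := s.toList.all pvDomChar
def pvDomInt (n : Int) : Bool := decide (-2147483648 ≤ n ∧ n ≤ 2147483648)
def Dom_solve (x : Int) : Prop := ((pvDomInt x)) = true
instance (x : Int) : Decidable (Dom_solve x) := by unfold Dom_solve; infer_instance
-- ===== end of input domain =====

-- B replaces A's 10-slot count array (built in one pass, re-checked in a second) by
-- sorting the characters of str(x) and checking each contiguous run's length by recursion.

-- ===== PORT A =====
-- for ch in s: vec[ord(ch)-48] += 1
def solveLoop1 : List Char → List Int → List Int
  | [], vec => vec
  | ch :: t, vec =>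
      let i : Int := (ch.toNat : Int) - 48
      solveLoop1 t (PySem.List.pySetD vec i (PySem.List.pyGetD vec i 0 + 1))

-- for ch in s: c = ord(ch)-48; if c == 0 or vec[c] != c: return False
def solveLoop2 : List Char → List Int → Bool
  | [], _ => true
  | ch :: t, vec =>
      let c : Int := (ch.toNat : Int) - 48
      if c == 0 || PySem.List.pyGetD vec c 0 != c then false
      else solveLoop2 t vec

def solve (x : Int) : Bool :=
  let s := PySem.Int.toChars x
  solveLoop2 s (solveLoop1 s (List.replicate 10 (0 : Int)))

-- ===== PORT B =====
-- _check(s): leading run of s[0] must have length ord(s[0])-48, then recurse on the rest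
def solveRuns : List Char → Bool
  | [] => true
  | ch :: rest =>
      let n := (rest.takeWhile (fun c => c == ch)).length
      if ((ch.toNat : Int) - 48) != (1 + n : Int) then false
      else solveRuns (rest.drop n)
  termination_by s => s.length
  decreasing_by
    simp only [List.length_cons, List.length_drop]
    omega

def solve_alt (x : Int) : Bool :=
  solveRuns (PySem.List.sorted (PySem.Int.toChars x) (fun c => c) false)

-- ===== PRECONDITION & SPEC =====
def Spec_solve (x : Int) (out : Bool) : Prop := out = solve_alt x
instance (x : Int) (out : Bool) : Decidable (Spec_solve x out) := by unfold Spec_solve; infer_instance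

-- ===== CLAIM (what is proved, stated in full; the proofs are below) =====
def Claim_equal_solve : Prop := ∀ (x : Int), Dom_solve x → Spec_solve x (solve x)

-- ===== LEMMAS AND PROOFS =====

theorem char_eq_of_toNat_eq {a b : Char} (h : a.toNat = b.toNat) : a = b :=
  Char.ext_iff.mpr (UInt32.toNat_inj.mp h)

theorem char_le_iff {a b : Char} : a ≤ b ↔ a.toNat ≤ b.toNat := by
  rw [Char.le_def, UInt32.le_iff_toNat_le]; rfl

-- every character of Nat.toDigits 10 m is a decimal digit
theorem toDigitsCore_digits (f : Nat) : ∀ (n : Nat) (l : List Char),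
    (∀ c ∈ l, 48 ≤ c.toNat ∧ c.toNat ≤ 57) →
    ∀ c ∈ Nat.toDigitsCore 10 f n l, 48 ≤ c.toNat ∧ c.toNat ≤ 57 := by
  induction f with
  | zero => intro n l hl; exact hl
  | succ f ih =>
      intro n l hl
      have hd : 48 ≤ (Nat.digitChar (n % 10)).toNat ∧ (Nat.digitChar (n % 10)).toNat ≤ 57 := by
        have h10 : n % 10 < 10 := Nat.mod_lt _ (by omega)
        interval_cases (n % 10) <;> decide
      simp only [Nat.toDigitsCore]
      split
      · intro c hc
        rcases List.mem_cons.mp hc with h | h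
        · exact h ▸ hd
        · exact hl c h
      · exact ih _ _ (by
          intro c hc
          rcases List.mem_cons.mp hc with h | h
          · exact h ▸ hd
          · exact hl c h)

theorem toDigits_digits (m : Nat) : ∀ c ∈ Nat.toDigits 10 m, 48 ≤ c.toNat ∧ c.toNat ≤ 57 :=
  toDigitsCore_digits (m + 1) m [] (by simp)

-- loop-1 invariants: length preserved, entries stay nonnegative
theorem solveLoop1_length (s : List Char) : ∀ vec : List Int,
    (solveLoop1 s vec).length = vec.length := by
  induction s with
  | nil => intro vec; rfl
  | cons ch t ih =>
      intro vec
      simp only [solveLoop1]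
      rw [ih]
      exact PySem.List.length_pySetD vec _ _

theorem mem_pySetD {α : Type} {xs : List α} {i : Int} {v a : α}
    (h : a ∈ PySem.List.pySetD xs i v) : a ∈ xs ∨ a = v := by
  unfold PySem.List.pySetD PySem.List.pySet? at h
  cases hk : PySem.List.pyIdx? xs.length i with
  | none => rw [hk] at h; exact Or.inl h
  | some k =>
      rw [hk] at h
      simp only [Option.map_some, Option.getD_some] at h
      exact List.mem_or_eq_of_mem_set h

theorem solveLoop1_nonneg (s : List Char) : ∀ vec : List Int,
    (∀ v ∈ vec, 0 ≤ v) → ∀ v ∈ solveLoop1 s vec, 0 ≤ v := by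
  induction s with
  | nil => intro vec h; exact h
  | cons ch t ih =>
      intro vec h
      simp only [solveLoop1]
      apply ih
      intro v hv
      rcases mem_pySetD hv with h' | h'
      · exact h v h'
      · subst h'
        have h0 : 0 ≤ PySem.List.pyGetD vec ((ch.toNat : Int) - 48) 0 := by
          cases hg : PySem.List.pyGet? vec ((ch.toNat : Int) - 48) with
          | none => simp [PySem.List.pyGetD, hg]
          | some a =>
              simp only [PySem.List.pyGetD, hg, Option.getD_some]
              exact h a (PySem.List.mem_of_pyGet?_eq_some _ hg)
        omega

-- loop-1 counting: slot of a digit character holds its count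
theorem solveLoop1_count (s : List Char) : ∀ vec : List Int, vec.length = 10 →
    (∀ c ∈ s, 48 ≤ c.toNat ∧ c.toNat ≤ 57) →
    ∀ ch : Char, 48 ≤ ch.toNat → ch.toNat ≤ 57 →
      PySem.List.pyGetD (solveLoop1 s vec) ((ch.toNat : Int) - 48) 0 =
        PySem.List.pyGetD vec ((ch.toNat : Int) - 48) 0 + (s.count ch : Int) := by
  induction s with
  | nil => intro vec _ _ ch _ _; simp [solveLoop1]
  | cons ch' t ih =>
      intro vec hlen hdig ch h1 h2
      obtain ⟨h1', h2'⟩ := hdig ch' (List.mem_cons_self ..)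
      have e' : (ch'.toNat : Int) - 48 = ((ch'.toNat - 48 : Nat) : Int) := by omega
      have e : (ch.toNat : Int) - 48 = ((ch.toNat - 48 : Nat) : Int) := by omega
      have hlt : ch'.toNat - 48 < vec.length := by omega
      simp only [solveLoop1]
      rw [ih _ (by rw [PySem.List.length_pySetD]; exact hlen)
            (fun c hc => hdig c (List.mem_cons_of_mem _ hc)) ch h1 h2]
      rw [e, e', PySem.List.pyGetD_pySetD_natCast vec _ _ _ _ hlt]
      by_cases hch : ch = ch'
      · subst hch
        rw [if_pos rfl]
        simp only [List.count_cons, BEq.rfl, if_true]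
        push_cast
        ring_nf
      · have hne : ch.toNat - 48 ≠ ch'.toNat - 48 := by
          intro h
          exact hch (char_eq_of_toNat_eq (by omega))
        rw [if_neg hne]
        have : (ch' == ch) = false := by
          simp only [beq_eq_false_iff_ne, ne_eq]
          exact fun h => hch h.symm
        simp only [List.count_cons, this, if_neg Bool.false_ne_true]
        push_cast
        ring_nf

-- loop-2 characterisation (early return = all)
theorem solveLoop2_iff (s : List Char) (vec : List Int) :
    solveLoop2 s vec = true ↔
      ∀ ch ∈ s, ¬((ch.toNat : Int) - 48 = 0) ∧
        PySem.List.pyGetD vec ((ch.toNat : Int) - 48) 0 = (ch.toNat : Int) - 48 := by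
  induction s with
  | nil => simp [solveLoop2]
  | cons ch t ih =>
      simp only [solveLoop2, List.mem_cons]
      by_cases hc : ((ch.toNat : Int) - 48 == 0
          || PySem.List.pyGetD vec ((ch.toNat : Int) - 48) 0 != (ch.toNat : Int) - 48) = true
      · rw [if_pos hc]
        simp only [Bool.or_eq_true, beq_iff_eq, bne_iff_ne] at hc
        constructor
        · intro h; cases h
        · intro h
          have := h ch (Or.inl rfl)
          tauto
      · rw [if_neg hc, ih]
        simp only [Bool.or_eq_true, beq_iff_eq, bne_iff_ne, not_or, not_not] at hc
        constructor
        · intro h c hmem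
          rcases hmem with rfl | hm
          · exact ⟨hc.1, hc.2⟩
          · exact h c hm
        · intro h c hm
          exact h c (Or.inr hm)

-- run recursion on a sorted list checks count = digit value for every element
theorem solveRuns_iff_aux : ∀ (N : Nat) (t : List Char), t.length ≤ N → t.Pairwise (· ≤ ·) →
    (solveRuns t = true ↔ ∀ c ∈ t, (c.toNat : Int) - 48 = (t.count c : Int)) := by
  intro N
  induction N with
  | zero =>
      intro t hN _
      obtain rfl : t = [] := List.eq_nil_of_length_eq_zero (by omega)
      simp [solveRuns]
  | succ N ih =>
      intro t hN hp
      cases t with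
      | nil => simp [solveRuns]
      | cons ch rest =>
          obtain ⟨hhead, hrest⟩ := List.pairwise_cons.mp hp
          have hsplit : rest.takeWhile (fun c => c == ch) ++ rest.dropWhile (fun c => c == ch)
              = rest := List.takeWhile_append_dropWhile
          have hallp : ∀ c ∈ rest.takeWhile (fun c => c == ch), c = ch := by
            intro c hc
            simpa using List.mem_takeWhile_imp hc
          have hq_pair : (rest.dropWhile (fun c => c == ch)).Pairwise (· ≤ ·) :=
            List.Pairwise.sublist (List.dropWhile_sublist _) hrest
          have hq_gt : ∀ c ∈ rest.dropWhile (fun c => c == ch), ch < c := by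
            cases hq : rest.dropWhile (fun c => c == ch) with
            | nil => simp
            | cons c0 q1 =>
                have hne0 : (c0 == ch) = false := by
                  have := List.head_dropWhile_not (fun c => c == ch) (l := rest)
                      (by rw [hq]; simp)
                  simpa [hq] using this
                have hc0mem : c0 ∈ rest :=
                  List.Sublist.mem (by rw [hq]; exact List.mem_cons_self ..)
                    (List.dropWhile_sublist _)
                have hlt0 : ch < c0 := by
                  rcases lt_or_eq_of_le (hhead c0 hc0mem) with h | h
                  · exact h
                  · exact absurd (beq_iff_eq.mpr h.symm) (by simp [hne0])
                intro c hc
                rcases List.mem_cons.mp hc with rfl | hm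
                · exact hlt0
                · exact lt_of_lt_of_le hlt0
                    (List.rel_of_pairwise_cons (hq ▸ hq_pair) hm)
          have hchq : ch ∉ rest.dropWhile (fun c => c == ch) := fun h =>
            absurd (hq_gt ch h) (lt_irrefl ch)
          have hpcount : (rest.takeWhile (fun c => c == ch)).count ch
              = (rest.takeWhile (fun c => c == ch)).length :=
            List.count_eq_length.mpr (fun b hb => (hallp b hb).symm)
          have hcountch : (ch :: rest).count ch
              = (rest.takeWhile (fun c => c == ch)).length + 1 := by
            rw [List.count_cons, ← hsplit, List.count_append, hpcount,
              List.count_eq_zero.mpr hchq]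
            simp
          have hcountq : ∀ c ∈ rest.dropWhile (fun c => c == ch),
              (ch :: rest).count c = (rest.dropWhile (fun c => c == ch)).count c := by
            intro c hc
            have hne : (ch == c) = false := by
              simp only [beq_eq_false_iff_ne, ne_eq]
              exact fun h => absurd (h ▸ hq_gt c hc) (lt_irrefl _)
            have hcp : c ∉ rest.takeWhile (fun c => c == ch) := by
              intro hcp
              exact absurd ((hallp c hcp) ▸ hq_gt c hc) (lt_irrefl _)
            rw [List.count_cons, ← hsplit, List.count_append,
              List.count_eq_zero.mpr hcp, hne]
            simp
          have hdrop : rest.drop (rest.takeWhile (fun c => c == ch)).length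
              = rest.dropWhile (fun c => c == ch) := by
            have h0 := List.drop_left (l₁ := rest.takeWhile (fun c => c == ch))
              (l₂ := rest.dropWhile (fun c => c == ch))
            rw [hsplit] at h0
            exact h0
          have hqlen : (rest.dropWhile (fun c => c == ch)).length ≤ N := by
            have h1 := List.Sublist.length_le (List.dropWhile_sublist
              (l := rest) (fun c => c == ch))
            simp only [List.length_cons] at hN
            omega
          have ihq := ih _ hqlen hq_pair
          simp only [solveRuns, hdrop]
          by_cases hb : (ch.toNat : Int) - 48
              = 1 + ((rest.takeWhile (fun c => c == ch)).length : Int)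
          · rw [hb]
            simp only [bne_self_eq_false, Bool.false_eq_true, if_false]
            rw [ihq]
            constructor
            · intro h c hc
              rcases List.mem_cons.mp hc with rfl | hm
              · rw [hcountch]; push_cast; omega
              · rcases List.mem_append.mp (hsplit ▸ hm) with hmp | hmq
                · rw [hallp c hmp, hcountch]; push_cast; omega
                · rw [hcountq c hmq]
                  exact h c hmq
            · intro h c hc
              have hcrest : c ∈ rest :=
                List.Sublist.mem hc (List.dropWhile_sublist _)
              rw [← hcountq c hc]
              exact h c (List.mem_cons_of_mem _ hcrest)
          · have hbne : (((ch.toNat : Int) - 48) !=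
                (1 + ((rest.takeWhile (fun c => c == ch)).length : Int))) = true := by
              simpa using hb
            rw [hbne]
            simp only [if_true]
            constructor
            · intro h; exact absurd h Bool.false_ne_true
            · intro h
              exfalso
              apply hb
              have := h ch (List.mem_cons_self ..)
              rw [hcountch] at this
              push_cast at this
              omega

theorem solveRuns_iff (t : List Char) (ht : t.Pairwise (· ≤ ·)) :
    solveRuns t = true ↔ ∀ c ∈ t, (c.toNat : Int) - 48 = (t.count c : Int) :=
  solveRuns_iff_aux t.length t le_rfl ht

theorem solve_eq (x : Int) : solve x = solve_alt x := by
  have hsolve : solve x = solveLoop2 (PySem.Int.toChars x)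
      (solveLoop1 (PySem.Int.toChars x) (List.replicate 10 (0 : Int))) := rfl
  have halt : solve_alt x
      = solveRuns (PySem.List.sorted (PySem.Int.toChars x) (fun c => c) false) := rfl
  have h45 : ('-' : Char).toNat = 45 := rfl
  by_cases hneg : x < 0
  · -- negative input: '-' makes both sides return false
    have hs : PySem.Int.toChars x = '-' :: Nat.toDigits 10 x.natAbs := by
      simp [PySem.Int.toChars, hneg]
    rw [hsolve, halt, hs]
    have hlen : (solveLoop1 ('-' :: Nat.toDigits 10 x.natAbs)
        (List.replicate 10 (0 : Int))).length = 10 := by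
      rw [solveLoop1_length]; simp
    have hnn : ∀ v ∈ solveLoop1 ('-' :: Nat.toDigits 10 x.natAbs)
        (List.replicate 10 (0 : Int)), 0 ≤ v := by
      apply solveLoop1_nonneg
      intro v hv
      simp [List.eq_of_mem_replicate hv]
    have hget : PySem.List.pyGetD (solveLoop1 ('-' :: Nat.toDigits 10 x.natAbs)
        (List.replicate 10 (0 : Int))) ((('-' : Char).toNat : Int) - 48) 0
        ≠ (('-' : Char).toNat : Int) - 48 := by
      have he : (('-' : Char).toNat : Int) - 48 = -3 := by rw [h45]; norm_num
      rw [he]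
      have hin : PySem.Raise.InRange (solveLoop1 ('-' :: Nat.toDigits 10 x.natAbs)
          (List.replicate 10 (0 : Int))).length (-3) := by
        rw [hlen]
        exact ⟨by norm_num, by norm_num⟩
      have := hnn _ (PySem.List.pyGetD_mem _ 0 hin)
      omega
    have hLHS : solveLoop2 ('-' :: Nat.toDigits 10 x.natAbs)
        (solveLoop1 ('-' :: Nat.toDigits 10 x.natAbs) (List.replicate 10 (0 : Int)))
        = false := by
      simp only [solveLoop2]
      rw [if_pos (by
        simp only [Bool.or_eq_true, bne_iff_ne]
        exact Or.inr hget)]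
    obtain ⟨h0, t2, hteq⟩ : ∃ h0 t2,
        PySem.List.sorted ('-' :: Nat.toDigits 10 x.natAbs) (fun c => c) false
          = h0 :: t2 := by
      cases htt : PySem.List.sorted ('-' :: Nat.toDigits 10 x.natAbs) (fun c => c) false with
      | nil => exact absurd ((PySem.List.sorted_eq_nil_iff ..).mp htt) (by simp)
      | cons a b => exact ⟨a, b, rfl⟩
    have h0mem : h0 ∈ '-' :: Nat.toDigits 10 x.natAbs := by
      rw [← PySem.List.mem_sorted _ (fun c => c) false, hteq]
      exact List.mem_cons_self ..
    have h0le : h0 ≤ '-' :=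
      PySem.List.key_head_sorted_le _ _ hteq '-' (List.mem_cons_self ..)
    have h0eq : h0 = '-' := by
      rcases List.mem_cons.mp h0mem with rfl | hds
      · rfl
      · exfalso
        have hd := (toDigits_digits _ h0 hds).1
        have hle := char_le_iff.mp h0le
        omega
    rw [hteq, h0eq, hLHS]
    simp only [solveRuns]
    rw [if_pos (bne_iff_ne.mpr (by
      have hge := Int.natCast_nonneg ((t2.takeWhile (fun c => c == '-')).length)
      rw [h45]
      push_cast
      omega))]
  · -- nonnegative input: both test count = digit value for every character
    have hs : PySem.Int.toChars x = Nat.toDigits 10 x.toNat := by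
      simp [PySem.Int.toChars, hneg]
    have hdig := toDigits_digits x.toNat
    have hVcount : ∀ c ∈ Nat.toDigits 10 x.toNat,
        PySem.List.pyGetD (solveLoop1 (Nat.toDigits 10 x.toNat)
          (List.replicate 10 (0 : Int))) ((c.toNat : Int) - 48) 0
        = ((Nat.toDigits 10 x.toNat).count c : Int) := by
      intro c hc
      obtain ⟨hl, hu⟩ := hdig c hc
      rw [solveLoop1_count _ _ (by simp) hdig c hl hu]
      have e : (c.toNat : Int) - 48 = ((c.toNat - 48 : Nat) : Int) := by omega
      rw [e, PySem.List.pyGetD_natCast, List.getD_replicate _ (by omega), zero_add]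
    rw [hsolve, halt, hs, Bool.eq_iff_iff, solveLoop2_iff,
      solveRuns_iff _ (PySem.List.sorted_pairwise (Nat.toDigits 10 x.toNat) (fun c => c))]
    constructor
    · intro h c hc
      have hcds : c ∈ Nat.toDigits 10 x.toNat :=
        (PySem.List.mem_sorted ..).mp hc
      obtain ⟨hz, heq⟩ := h c hcds
      rw [hVcount c hcds] at heq
      rw [(PySem.List.sorted_perm (Nat.toDigits 10 x.toNat) (fun c => c) false).count_eq c]
      exact heq.symm
    · intro h c hc
      have hct : c ∈ PySem.List.sorted (Nat.toDigits 10 x.toNat) (fun c => c) false :=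
        (PySem.List.mem_sorted ..).mpr hc
      have heq := h c hct
      rw [(PySem.List.sorted_perm (Nat.toDigits 10 x.toNat) (fun c => c) false).count_eq c]
        at heq
      have hpos : 0 < (Nat.toDigits 10 x.toNat).count c := List.count_pos_iff.mpr hc
      refine ⟨by omega, ?_⟩
      rw [hVcount c hc]
      omega

-- ===== VERDICT (by name: the statement is the Claim_ definition above) =====
theorem solve_spec : Claim_equal_solve := by
  intro x _
  unfold Spec_solve
  exact solve_eq x
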